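-- pv_equiv track=rewrite | github.com/guipateiro/TCC | tensorflow/bit_change/modifica_entrada.py | modificar_numero_na_posicao
-- ===== SOURCE A (Python) =====
-- def modificar_numero_na_posicao(string, posicao):
--     # Divide a string pelos espaços em branco
--     lista = string.split()
--
--     # Inicializa um contador de posição
--     contador = 0
--
--     # Inicializa uma lista para armazenar os novos elementos
--     nova_lista = []
--
--     # Percorre a lista dividida e modifica o valor na posição desejada
--     for elemento in lista:
--         if contador == posicao:
--             if lista[contador] == "1":
--                 nova_lista.append("0")
--             else:
--                 nova_lista.append("1")
--         else:
--             nova_lista.append(elemento)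
--         contador += 1
--
--     # Reconstrói a string modificada com espaços em branco
--     nova_string = " ".join(nova_lista)
--
--     return nova_string
-- ===== SOURCE B (Python) =====
-- def modificar_numero_na_posicao(string, posicao):
--     lista = string.split()
--     if 0 <= posicao < len(lista):
--         lista[posicao] = "0" if lista[posicao] == "1" else "1"
--     return " ".join(lista)
-- ===== Notes on version B (the rewrite author's own statement) =====
-- stated objective: simpler
-- what changed: Replaces the counter-driven copy loop that rebuilds the whole token list with a single guarded in-place update of the token at the given index, reusing the split/join scaffolding.
import Mathlib
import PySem

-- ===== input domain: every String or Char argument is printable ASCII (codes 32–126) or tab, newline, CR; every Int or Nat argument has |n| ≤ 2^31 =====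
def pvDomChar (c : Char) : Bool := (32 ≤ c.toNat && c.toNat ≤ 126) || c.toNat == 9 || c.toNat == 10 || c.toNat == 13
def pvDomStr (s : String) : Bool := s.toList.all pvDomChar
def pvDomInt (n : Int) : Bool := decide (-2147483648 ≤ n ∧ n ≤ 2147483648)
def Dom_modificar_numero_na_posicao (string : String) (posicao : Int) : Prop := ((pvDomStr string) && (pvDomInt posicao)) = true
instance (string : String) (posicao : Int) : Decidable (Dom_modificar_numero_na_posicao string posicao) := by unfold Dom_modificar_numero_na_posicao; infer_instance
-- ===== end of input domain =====

-- B replaces A's counter-driven copy loop with a single guarded in-place update of the indexed token (simpler decomposition).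


-- ===== PORT A =====
def modificar_numero_na_posicao (string : String) (posicao : Int) : String :=
  let lista := PySem.Str.split₀ string
  let r := lista.foldl (fun (st : Int × List String) elemento =>
      let contador := st.1
      let nova_lista := st.2
      let nova_lista :=
        if contador = posicao then
          if PySem.List.pyGet? lista contador = some "1" then nova_lista ++ ["0"]
          else nova_lista ++ ["1"]
        else nova_lista ++ [elemento]
      (contador + 1, nova_lista)) ((0 : Int), ([] : List String))
  PySem.Str.join " " r.2

-- ===== PORT B =====
def modificar_numero_na_posicao_alt (string : String) (posicao : Int) : String :=
  let lista := PySem.Str.split₀ string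
  let lista :=
    if 0 ≤ posicao ∧ posicao < lista.length then
      lista.set posicao.toNat
        (if lista.getD posicao.toNat "" = "1" then "0" else "1")
    else lista
  PySem.Str.join " " lista

-- ===== PRECONDITION & SPEC =====
def Spec_modificar_numero_na_posicao (string : String) (posicao : Int) (out : String) : Prop := out = modificar_numero_na_posicao_alt string posicao
instance (string : String) (posicao : Int) (out : String) : Decidable (Spec_modificar_numero_na_posicao string posicao out) := by unfold Spec_modificar_numero_na_posicao; infer_instance

-- ===== CLAIM (what is proved, stated in full; the proofs are below) =====
def Claim_equal_modificar_numero_na_posicao : Prop := ∀ (string : String) (posicao : Int), Dom_modificar_numero_na_posicao string posicao → Spec_modificar_numero_na_posicao string posicao (modificar_numero_na_posicao string posicao)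

-- ===== LEMMAS AND PROOFS =====

-- the flipped element
def pvFlip (x : String) : String := if x = "1" then "0" else "1"

-- the common characterisation: element at absolute index c flipped iff c = posicao
def pvTrans (posicao : Int) : Int → List String → List String
  | _, [] => []
  | c, x :: xs => (if c = posicao then pvFlip x else x) :: pvTrans posicao (c + 1) xs

theorem pvTrans_out (posicao : Int) : ∀ (l : List String) (c : Int),
    (posicao < c ∨ (c + l.length ≤ posicao)) → pvTrans posicao c l = l := by
  intro l
  induction l with
  | nil => intro c _; rfl
  | cons x xs ih =>
    intro c h
    simp only [pvTrans, List.length_cons] at *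
    have hne : ¬ c = posicao := by omega
    rw [if_neg hne, ih (c + 1) (by omega)]

theorem pvTrans_set (posicao : Int) : ∀ (l : List String) (c : Int),
    c ≤ posicao → posicao < c + l.length →
    pvTrans posicao c l = l.set (posicao - c).toNat (pvFlip (l.getD (posicao - c).toNat "")) := by
  intro l
  induction l with
  | nil => intro c h1 h2; simp at h2; omega
  | cons x xs ih =>
    intro c h1 h2
    by_cases hc : c = posicao
    · have h0 : (posicao - c).toNat = 0 := by omega
      simp only [pvTrans, if_pos hc, h0, List.set_cons_zero, List.getD_cons_zero]
      rw [pvTrans_out posicao xs (c + 1) (by omega)]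
    · have hk : (posicao - c).toNat = (posicao - (c + 1)).toNat + 1 := by omega
      simp only [pvTrans, if_neg hc, hk, List.set_cons_succ, List.getD_cons_succ]
      rw [ih (c + 1) (by omega) (by simp at h2; omega)]

-- A's fold, relative to the full list
theorem pvFoldA (posicao : Int) (full : List String) : ∀ (rest : List String) (n : Nat) (acc : List String),
    full.drop n = rest →
    (rest.foldl (fun (st : Int × List String) elemento =>
      let contador := st.1
      let nova_lista := st.2
      let nova_lista :=
        if contador = posicao then
          if PySem.List.pyGet? full contador = some "1" then nova_lista ++ ["0"]
          else nova_lista ++ ["1"]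
        else nova_lista ++ [elemento]
      (contador + 1, nova_lista)) ((n : Int), acc)).2 = acc ++ pvTrans posicao (n : Int) rest := by
  intro rest
  induction rest with
  | nil => intro n acc _; simp [pvTrans]
  | cons x xs ih =>
    intro n acc hdrop
    have hget : PySem.List.pyGet? full (n : Int) = some x := by
      rw [PySem.List.pyGet?_natCast]
      have h0 : (full.drop n)[0]? = some x := by rw [hdrop]; rfl
      simpa [List.getElem?_drop] using h0
    have hdrop' : full.drop (n + 1) = xs := by
      have : full.drop (n + 1) = (full.drop n).drop 1 := by
        rw [List.drop_drop]
      rw [this, hdrop]; rfl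
    simp only [List.foldl_cons, pvTrans]
    have hcast : ((n : Int) + 1) = ((n + 1 : Nat) : Int) := by push_cast; ring
    by_cases hc : (n : Int) = posicao
    · rw [if_pos hc]
      by_cases h1 : x = "1"
      · rw [if_pos (by rw [hget, h1])]
        rw [hcast, ih (n + 1) _ hdrop']
        simp [pvFlip, hc, h1]
      · rw [if_neg (by rw [hget]; simp [h1])]
        rw [hcast, ih (n + 1) _ hdrop']
        simp [pvFlip, hc, h1]
    · rw [if_neg hc]
      rw [hcast, ih (n + 1) _ hdrop']
      simp [hc]

theorem pvB_eq_trans (posicao : Int) (l : List String) :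
    (if 0 ≤ posicao ∧ posicao < l.length then
      l.set posicao.toNat (if l.getD posicao.toNat "" = "1" then "0" else "1")
     else l) = pvTrans posicao 0 l := by
  by_cases h : 0 ≤ posicao ∧ posicao < l.length
  · rw [if_pos h, pvTrans_set posicao l 0 h.1 (by simpa using h.2)]
    simp [pvFlip]
  · rw [if_neg h]
    rw [pvTrans_out posicao l 0 (by simp at h; omega)]

-- ===== VERDICT (by name: the statement is the Claim_ definition above) =====
theorem modificar_numero_na_posicao_spec : Claim_equal_modificar_numero_na_posicao := by
  intro string posicao _
  unfold Spec_modificar_numero_na_posicao modificar_numero_na_posicao modificar_numero_na_posicao_alt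
  have hA := pvFoldA posicao (PySem.Str.split₀ string) (PySem.Str.split₀ string) 0 [] (by simp)
  simp only [Nat.cast_zero, List.nil_append] at hA
  simp only [hA, pvB_eq_trans]
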